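-- pv_equiv track=rewrite | github.com/rabinkmc/dsa | find-maximum-balanced-xor-subarray-length.py | maxBalancedSubarray
-- ===== SOURCE A (Python) =====
-- from typing import List
--
-- def maxBalancedSubarray(nums: List[int]) -> int:
--     csum = 0
--     n = len(nums)
--     seen = {(0, 0): -1}
--     ans = 0
--     oc = 0
--     ec = 0
--     for j in range(n):
--         if nums[j] % 2 == 0:
--             ec += 1
--         else:
--             oc += 1
--         csum = csum ^ nums[j]
--         hash = (csum, ec - oc)
--         if hash in seen:
--             i = seen[hash]
--             ans = max(ans, j - i)
--         else:
--             seen[hash] = j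
--     return ans
-- ===== SOURCE B (Python) =====
-- from typing import List
--
-- def maxBalancedSubarray(nums: List[int]) -> int:
--     n = len(nums)
--     best = 0
--     for i in range(n):
--         x = 0
--         c = 0
--         for j in range(i, n):
--             x ^= nums[j]
--             c += 1 if nums[j] % 2 == 0 else -1
--             if x == 0 and c == 0:
--                 best = max(best, j - i + 1)
--     return best
-- ===== Notes on version B (the rewrite author's own statement) =====
-- stated objective: alternative
-- what changed: Replaces the single-pass earliest-prefix hashmap with a brute-force double loop that rescans every subarray, maintaining a running xor and even-minus-odd counter per start index.
import Mathlib
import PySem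

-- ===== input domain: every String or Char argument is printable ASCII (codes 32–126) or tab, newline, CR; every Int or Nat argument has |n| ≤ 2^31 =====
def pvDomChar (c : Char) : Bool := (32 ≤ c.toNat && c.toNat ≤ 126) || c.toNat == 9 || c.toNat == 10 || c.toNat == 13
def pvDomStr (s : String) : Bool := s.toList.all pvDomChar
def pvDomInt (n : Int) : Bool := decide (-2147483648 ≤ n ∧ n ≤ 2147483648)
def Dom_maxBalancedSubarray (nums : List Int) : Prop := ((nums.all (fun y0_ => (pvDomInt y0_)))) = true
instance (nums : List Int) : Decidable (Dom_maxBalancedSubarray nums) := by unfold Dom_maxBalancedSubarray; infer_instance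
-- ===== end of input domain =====

-- B replaces A's single-pass earliest-prefix hashmap with a brute-force double loop that
-- rescans every subarray (objective: alternative, not faster).

-- ===== PORT A =====
-- A-side helper: the body of A's for-loop (state = (csum, oc, ec, seen, ans)).
def stepA (nums : List Int) (s : Int × Int × Int × PySem.Dict (Int × Int) Int × Int) (j : Int) :
    Int × Int × Int × PySem.Dict (Int × Int) Int × Int :=
  let x := PySem.List.pyGetD nums j 0
  let oc' := if PySem.Int.mod x 2 = 0 then s.2.1 else s.2.1 + 1
  let ec' := if PySem.Int.mod x 2 = 0 then s.2.2.1 + 1 else s.2.2.1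
  let csum' := PySem.Int.bxor s.1 x
  match (s.2.2.2.1).get? (csum', ec' - oc') with
  | some i => (csum', oc', ec', s.2.2.2.1, max s.2.2.2.2 (j - i))
  | none => (csum', oc', ec', (s.2.2.2.1).insert (csum', ec' - oc') j, s.2.2.2.2)

def maxBalancedSubarray (nums : List Int) : Int :=
  let n : Int := PySem.List.len nums
  ((PySem.List.pyRange 0 n 1).foldl (stepA nums)
    (0, 0, 0, PySem.Dict.ofList [(((0 : Int), (0 : Int)), (-1 : Int))], 0)).2.2.2.2

-- ===== PORT B =====
-- B-side helper: the body of B's inner for-loop (state = (x, c, best)).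
def stepB (nums : List Int) (i : Int) (s : Int × Int × Int) (j : Int) : Int × Int × Int :=
  let v := PySem.List.pyGetD nums j 0
  let x' := PySem.Int.bxor s.1 v
  let c' := s.2.1 + (if PySem.Int.mod v 2 = 0 then 1 else -1)
  if x' = 0 ∧ c' = 0 then (x', c', max s.2.2 (j - i + 1)) else (x', c', s.2.2)

def maxBalancedSubarray_alt (nums : List Int) : Int :=
  let n : Int := PySem.List.len nums
  (PySem.List.pyRange 0 n 1).foldl
    (fun best i => ((PySem.List.pyRange i n 1).foldl (stepB nums i) (0, 0, best)).2.2) 0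

-- ===== PRECONDITION & SPEC =====
def Spec_maxBalancedSubarray (nums : List Int) (out : Int) : Prop := out = maxBalancedSubarray_alt nums
instance (nums : List Int) (out : Int) : Decidable (Spec_maxBalancedSubarray nums out) := by unfold Spec_maxBalancedSubarray; infer_instance

-- ===== CLAIM (what is proved, stated in full; the proofs are below) =====
def Claim_equal_maxBalancedSubarray : Prop := ∀ (nums : List Int), Dom_maxBalancedSubarray nums → Spec_maxBalancedSubarray nums (maxBalancedSubarray nums)

-- ===== LEMMAS AND PROOFS =====

-- xor algebra for PySem.Int.bxor
theorem bxor_oo (m n : Nat) : PySem.Int.bxor (Int.ofNat m) (Int.ofNat n) = Int.ofNat (m ^^^ n) := by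
  simp [PySem.Int.bxor]

theorem bxor_on (m n : Nat) : PySem.Int.bxor (Int.ofNat m) (Int.negSucc n) = Int.negSucc (m ^^^ n) := by
  simp [PySem.Int.bxor, Int.negSucc_eq]
  rw [if_neg (by omega)]
  omega

theorem bxor_no (m n : Nat) : PySem.Int.bxor (Int.negSucc m) (Int.ofNat n) = Int.negSucc (m ^^^ n) := by
  simp [PySem.Int.bxor, Int.negSucc_eq]
  rw [if_neg (by omega)]
  omega

theorem bxor_nn (m n : Nat) : PySem.Int.bxor (Int.negSucc m) (Int.negSucc n) = Int.ofNat (m ^^^ n) := by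
  simp [PySem.Int.bxor, Int.negSucc_eq]
  rw [if_neg (by omega), if_neg (by omega)]

theorem bxor_assoc (a b c : Int) :
    PySem.Int.bxor (PySem.Int.bxor a b) c = PySem.Int.bxor a (PySem.Int.bxor b c) := by
  rcases a with m | m <;> rcases b with n | n <;> rcases c with k | k <;>
    simp only [bxor_oo, bxor_on, bxor_no, bxor_nn, Nat.xor_assoc]

theorem zero_bxor (a : Int) : PySem.Int.bxor 0 a = a := by
  rw [PySem.Int.bxor_comm]; exact PySem.Int.bxor_zero a

theorem bxor_cancel {a s : Int} : PySem.Int.bxor a s = a ↔ s = 0 := by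
  constructor
  · intro h
    have h2 : PySem.Int.bxor a (PySem.Int.bxor a s) = PySem.Int.bxor a a := by rw [h]
    rw [← bxor_assoc, PySem.Int.bxor_self, zero_bxor] at h2
    simpa using h2
  · intro h; rw [h, PySem.Int.bxor_zero]

-- ghost quantities: xor / even-minus-odd balance of a list, keys of prefixes
def gXor (l : List Int) : Int := l.foldl PySem.Int.bxor 0

def gSign (x : Int) : Int := if PySem.Int.mod x 2 = 0 then 1 else -1

def gBal (l : List Int) : Int := (l.map gSign).sum

def gKey (nums : List Int) (p : Nat) : Int × Int := (gXor (nums.take p), gBal (nums.take p))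

def gF (nums : List Int) (q : Nat) : Nat :=
  Nat.find (p := fun p => gKey nums p = gKey nums q) ⟨q, rfl⟩

def vA (nums : List Int) (j : Nat) : Int := (j : Int) + 1 - (gF nums (j + 1) : Int)

def gA (nums : List Int) (m : Nat) : Int :=
  (List.range m).foldl (fun a j => max a (vA nums j)) 0

theorem foldl_bxor (l : List Int) (a : Int) : l.foldl PySem.Int.bxor a = PySem.Int.bxor a (gXor l) := by
  induction l generalizing a with
  | nil => simp [gXor, PySem.Int.bxor_zero]
  | cons x t ih =>
    show List.foldl _ (PySem.Int.bxor a x) t = _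
    rw [ih]
    have : gXor (x :: t) = PySem.Int.bxor x (gXor t) := by
      show List.foldl _ (PySem.Int.bxor 0 x) t = _
      rw [ih, zero_bxor]
    rw [this, bxor_assoc]

theorem gXor_append (l1 l2 : List Int) : gXor (l1 ++ l2) = PySem.Int.bxor (gXor l1) (gXor l2) := by
  show List.foldl _ _ _ = _
  rw [List.foldl_append, foldl_bxor]
  rfl

theorem gBal_append (l1 l2 : List Int) : gBal (l1 ++ l2) = gBal l1 + gBal l2 := by
  simp [gBal]

theorem gXor_singleton (x : Int) : gXor [x] = x := by
  simp [gXor, zero_bxor]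

theorem gBal_singleton (x : Int) : gBal [x] = gSign x := by
  simp [gBal]

-- prefix-extension facts
theorem take_succ_getD {nums : List Int} {m : Nat} (h : m < nums.length) :
    nums.take (m + 1) = nums.take m ++ [nums.getD m 0] := by
  rw [List.take_succ]
  congr 1
  rw [List.getElem?_eq_getElem h]
  simp [List.getD, List.getElem?_eq_getElem h]

-- the segment nums[p:q]
def gSeg (nums : List Int) (p q : Nat) : List Int := (nums.take q).drop p

theorem take_eq_take_append_seg {nums : List Int} {p q : Nat} (h : p ≤ q) :
    nums.take q = nums.take p ++ gSeg nums p q := by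
  rw [gSeg]
  conv_lhs => rw [← List.take_append_drop p (nums.take q)]
  rw [List.take_take, Nat.min_eq_left h]

theorem gKey_eq_iff {nums : List Int} {p q : Nat} (h : p ≤ q) :
    gKey nums q = gKey nums p ↔ (gXor (gSeg nums p q) = 0 ∧ gBal (gSeg nums p q) = 0) := by
  rw [gKey, gKey, take_eq_take_append_seg h, gXor_append, gBal_append, Prod.mk.injEq]
  constructor
  · rintro ⟨h1, h2⟩
    exact ⟨bxor_cancel.mp h1, by omega⟩
  · rintro ⟨h1, h2⟩
    exact ⟨by rw [h1, PySem.Int.bxor_zero], by omega⟩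

-- gF facts
theorem gF_key (nums : List Int) (q : Nat) : gKey nums (gF nums q) = gKey nums q :=
  Nat.find_spec (p := fun p => gKey nums p = gKey nums q) ⟨q, rfl⟩

theorem gF_le (nums : List Int) (q : Nat) : gF nums q ≤ q :=
  Nat.find_min' _ rfl

theorem gF_min {nums : List Int} {p q : Nat} (h : gKey nums p = gKey nums q) : gF nums q ≤ p :=
  Nat.find_min' _ h

theorem gF_congr {nums : List Int} {p q : Nat} (h : gKey nums p = gKey nums q) :
    gF nums p = gF nums q := by
  apply Nat.le_antisymm
  · exact gF_min (p := gF nums q) (by rw [gF_key nums q, ← h])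
  · exact gF_min (p := gF nums p) (by rw [gF_key nums p, h])

theorem gF_zero (nums : List Int) : gF nums 0 = 0 := Nat.le_zero.mp (gF_le nums 0)

theorem gA_nonneg (nums : List Int) (m : Nat) : 0 ≤ gA nums m := by
  rw [gA]; exact (PySem.List.le_foldl_max_int (List.range m) (vA nums) 0).1

theorem gA_succ (nums : List Int) (m : Nat) :
    gA nums (m + 1) = max (gA nums m) (vA nums m) := by
  rw [gA, gA, List.range_succ, List.foldl_append]
  rfl

-- even/odd counters: ec - oc = gBal
theorem countP_sub_countP (l : List Int) :
    ((l.countP (fun x => decide (PySem.Int.mod x 2 = 0)) : Int)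
      - (l.countP (fun x => !decide (PySem.Int.mod x 2 = 0)) : Int)) = gBal l := by
  induction l with
  | nil => simp [gBal]
  | cons x t ih =>
    by_cases hx : PySem.Int.mod x 2 = 0
    · simp [List.countP_cons, gBal, gSign, hx] at *
      omega
    · simp [List.countP_cons, gBal, gSign, hx] at *
      omega

-- segment extension facts
theorem gSeg_self (nums : List Int) (i : Nat) : gSeg nums i i = [] := by
  apply List.drop_eq_nil_of_le
  simp [List.length_take]

theorem gSeg_succ {nums : List Int} {i m : Nat} (hi : i ≤ m) (hm : m < nums.length) :
    gSeg nums i (m + 1) = gSeg nums i m ++ [nums.getD m 0] := by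
  rw [gSeg, gSeg, take_succ_getD hm, List.drop_append_of_le_length]
  rw [List.length_take]
  omega

-- ===== A characterization =====
theorem A_loop (nums : List Int) (m : Nat) (hm : m ≤ nums.length) :
    ∃ seen : PySem.Dict (Int × Int) Int,
      ((PySem.List.pyRange 0 (m : Int) 1).foldl (stepA nums)
          (0, 0, 0, PySem.Dict.ofList [(((0 : Int), (0 : Int)), (-1 : Int))], 0)) =
        (gXor (nums.take m),
         ((nums.take m).countP (fun x => !decide (PySem.Int.mod x 2 = 0)) : Int),
         ((nums.take m).countP (fun x => decide (PySem.Int.mod x 2 = 0)) : Int),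
         seen, gA nums m)
      ∧ (∀ p ≤ m, seen.get? (gKey nums p) = some ((gF nums p : Int) - 1))
      ∧ (∀ v, (∀ p ≤ m, gKey nums p ≠ v) → seen.get? v = none) := by
  revert hm
  induction m with
  | zero =>
    intro _
    refine ⟨PySem.Dict.ofList [(((0 : Int), (0 : Int)), (-1 : Int))], by simp [gXor, gA], ?_, ?_⟩
    · intro p hp
      interval_cases p
      rw [show gKey nums 0 = ((0 : Int), (0 : Int)) from rfl, gF_zero]
      rfl
    · intro v hv
      have hne : v ≠ ((0 : Int), (0 : Int)) := fun h => hv 0 (le_refl 0) (h ▸ rfl)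
      rw [show PySem.Dict.ofList [(((0 : Int), (0 : Int)), (-1 : Int))]
            = (PySem.Dict.empty (κ := Int × Int) (ν := Int)).insert ((0 : Int), (0 : Int)) (-1)
          from rfl,
        PySem.Dict.get?_insert_of_ne _ _ hne, PySem.Dict.get?_empty]
  | succ m ih =>
    intro hm
    obtain ⟨seen, hfold, inv1, inv2⟩ := ih (by omega)
    have hlt : m < nums.length := by omega
    have hx : PySem.List.pyGetD nums (m : Int) 0 = nums.getD m 0 := PySem.List.pyGetD_natCast nums m 0
    have hrange : PySem.List.pyRange 0 ((m + 1 : Nat) : Int) 1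
        = PySem.List.pyRange 0 (m : Int) 1 ++ [(m : Int)] := by
      have : ((m + 1 : Nat) : Int) = (m : Int) + 1 := by push_cast; ring
      rw [this, PySem.List.pyRange_one_succ_right (by positivity)]
    rw [hrange, List.foldl_append, hfold, List.foldl_cons, List.foldl_nil]
    -- the new counters
    have hcount_e : ((nums.take (m + 1)).countP (fun x => decide (PySem.Int.mod x 2 = 0)) : Int)
        = ((nums.take m).countP (fun x => decide (PySem.Int.mod x 2 = 0)) : Int)
          + (if PySem.Int.mod (nums.getD m 0) 2 = 0 then 1 else 0) := by
      rw [take_succ_getD hlt, List.countP_append]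
      by_cases hp : PySem.Int.mod (nums.getD m 0) 2 = 0
      · rw [if_pos hp, List.countP_cons, List.countP_nil, if_pos (decide_eq_true hp)]
        push_cast
        ring
      · rw [if_neg hp, List.countP_cons, List.countP_nil,
          if_neg (by rw [decide_eq_true_eq]; exact hp)]
        push_cast
        ring
    have hcount_o : ((nums.take (m + 1)).countP (fun x => !decide (PySem.Int.mod x 2 = 0)) : Int)
        = ((nums.take m).countP (fun x => !decide (PySem.Int.mod x 2 = 0)) : Int)
          + (if PySem.Int.mod (nums.getD m 0) 2 = 0 then 0 else 1) := by
      rw [take_succ_getD hlt, List.countP_append]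
      by_cases hp : PySem.Int.mod (nums.getD m 0) 2 = 0
      · rw [if_pos hp, List.countP_cons, List.countP_nil,
          if_neg (by rw [Bool.not_eq_true', decide_eq_false_iff_not]; exact not_not_intro hp)]
        push_cast
        ring
      · rw [if_neg hp, List.countP_cons, List.countP_nil,
          if_pos (by rw [Bool.not_eq_true', decide_eq_false_iff_not]; exact hp)]
        push_cast
        ring
    have hxor : gXor (nums.take (m + 1)) = PySem.Int.bxor (gXor (nums.take m)) (nums.getD m 0) := by
      rw [take_succ_getD hlt, gXor_append, gXor_singleton]
    have hkey : (PySem.Int.bxor (gXor (nums.take m)) (nums.getD m 0),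
          ((nums.take (m + 1)).countP (fun x => decide (PySem.Int.mod x 2 = 0)) : Int)
            - ((nums.take (m + 1)).countP (fun x => !decide (PySem.Int.mod x 2 = 0)) : Int))
        = gKey nums (m + 1) := by
      rw [countP_sub_countP, gKey, hxor]
    simp only [stepA, hx]
    by_cases hex : ∃ p, p ≤ m ∧ gKey nums p = gKey nums (m + 1)
    · obtain ⟨p, hp, hkp⟩ := hex
      have hFc : gF nums p = gF nums (m + 1) := gF_congr hkp
      have hget : seen.get? (gKey nums (m + 1)) = some ((gF nums (m + 1) : Int) - 1) := by
        have := inv1 p hp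
        rw [hkp, hFc] at this
        exact this
      by_cases hpar : PySem.Int.mod (nums.getD m 0) 2 = 0
      · simp only [if_pos hpar]
        rw [show ((nums.take m).countP (fun x => decide (PySem.Int.mod x 2 = 0)) : Int) + 1
              = ((nums.take (m + 1)).countP (fun x => decide (PySem.Int.mod x 2 = 0)) : Int) by
            rw [hcount_e, if_pos hpar],
          show ((nums.take m).countP (fun x => !decide (PySem.Int.mod x 2 = 0)) : Int)
              = ((nums.take (m + 1)).countP (fun x => !decide (PySem.Int.mod x 2 = 0)) : Int) by
            rw [hcount_o, if_pos hpar]; ring,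
          hkey, hget]
        refine ⟨seen, ?_, ?_, ?_⟩
        · rw [gA_succ, hxor]
          refine Prod.ext rfl (Prod.ext rfl (Prod.ext rfl (Prod.ext rfl ?_)))
          show max (gA nums m) ((m : Int) - ((gF nums (m + 1) : Int) - 1)) = max (gA nums m) (vA nums m)
          rw [vA]
          ring_nf
        · intro p' hp'
          rcases Nat.lt_or_ge p' (m + 1) with h | h
          · exact inv1 p' (by omega)
          · have : p' = m + 1 := by omega
            rw [this]
            exact hget
        · intro v hv
          exact inv2 v (fun p hpm => hv p (by omega))
      · simp only [if_neg hpar]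
        rw [show ((nums.take m).countP (fun x => decide (PySem.Int.mod x 2 = 0)) : Int)
              = ((nums.take (m + 1)).countP (fun x => decide (PySem.Int.mod x 2 = 0)) : Int) by
            rw [hcount_e, if_neg hpar]; ring,
          show ((nums.take m).countP (fun x => !decide (PySem.Int.mod x 2 = 0)) : Int) + 1
              = ((nums.take (m + 1)).countP (fun x => !decide (PySem.Int.mod x 2 = 0)) : Int) by
            rw [hcount_o, if_neg hpar],
          hkey, hget]
        refine ⟨seen, ?_, ?_, ?_⟩
        · rw [gA_succ, hxor]
          refine Prod.ext rfl (Prod.ext rfl (Prod.ext rfl (Prod.ext rfl ?_)))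
          show max (gA nums m) ((m : Int) - ((gF nums (m + 1) : Int) - 1)) = max (gA nums m) (vA nums m)
          rw [vA]
          ring_nf
        · intro p' hp'
          rcases Nat.lt_or_ge p' (m + 1) with h | h
          · exact inv1 p' (by omega)
          · have : p' = m + 1 := by omega
            rw [this]
            exact hget
        · intro v hv
          exact inv2 v (fun p hpm => hv p (by omega))
    · have hnone : seen.get? (gKey nums (m + 1)) = none :=
        inv2 _ (fun p hp h => hex ⟨p, hp, h⟩)
      have hFm : gF nums (m + 1) = m + 1 := by
        by_contra h
        have hl : gF nums (m + 1) < m + 1 := lt_of_le_of_ne (gF_le nums (m + 1)) h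
        exact hex ⟨gF nums (m + 1), by omega, gF_key nums (m + 1)⟩
      have hansr : gA nums (m + 1) = gA nums m := by
        rw [gA_succ, vA, hFm]
        have : (m : Int) + 1 - ((m + 1 : Nat) : Int) = 0 := by push_cast; ring
        rw [this, max_eq_left (gA_nonneg nums m)]
      have hinv1' : ∀ p' ≤ m + 1,
          (seen.insert (gKey nums (m + 1)) (m : Int)).get? (gKey nums p')
            = some ((gF nums p' : Int) - 1) := by
        intro p' hp'
        rcases Nat.lt_or_ge p' (m + 1) with h | h
        · have hne : gKey nums p' ≠ gKey nums (m + 1) := fun hk => hex ⟨p', by omega, hk⟩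
          rw [PySem.Dict.get?_insert_of_ne _ _ hne]
          exact inv1 p' (by omega)
        · have : p' = m + 1 := by omega
          rw [this, PySem.Dict.get?_insert_self, hFm]
          congr 1
          push_cast
          ring
      have hinv2' : ∀ v, (∀ p ≤ m + 1, gKey nums p ≠ v) →
          (seen.insert (gKey nums (m + 1)) (m : Int)).get? v = none := by
        intro v hv
        have hne : v ≠ gKey nums (m + 1) := fun h => hv (m + 1) (le_refl _) h.symm
        rw [PySem.Dict.get?_insert_of_ne _ _ hne]
        exact inv2 v (fun p hpm => hv p (by omega))
      by_cases hpar : PySem.Int.mod (nums.getD m 0) 2 = 0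
      · simp only [if_pos hpar]
        rw [show ((nums.take m).countP (fun x => decide (PySem.Int.mod x 2 = 0)) : Int) + 1
              = ((nums.take (m + 1)).countP (fun x => decide (PySem.Int.mod x 2 = 0)) : Int) by
            rw [hcount_e, if_pos hpar],
          show ((nums.take m).countP (fun x => !decide (PySem.Int.mod x 2 = 0)) : Int)
              = ((nums.take (m + 1)).countP (fun x => !decide (PySem.Int.mod x 2 = 0)) : Int) by
            rw [hcount_o, if_pos hpar]; ring,
          hkey, hnone]
        exact ⟨seen.insert (gKey nums (m + 1)) (m : Int),
          by rw [hansr, hxor], hinv1', hinv2'⟩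
      · simp only [if_neg hpar]
        rw [show ((nums.take m).countP (fun x => decide (PySem.Int.mod x 2 = 0)) : Int)
              = ((nums.take (m + 1)).countP (fun x => decide (PySem.Int.mod x 2 = 0)) : Int) by
            rw [hcount_e, if_neg hpar]; ring,
          show ((nums.take m).countP (fun x => !decide (PySem.Int.mod x 2 = 0)) : Int) + 1
              = ((nums.take (m + 1)).countP (fun x => !decide (PySem.Int.mod x 2 = 0)) : Int) by
            rw [hcount_o, if_neg hpar],
          hkey, hnone]
        exact ⟨seen.insert (gKey nums (m + 1)) (m : Int),
          by rw [hansr, hxor], hinv1', hinv2'⟩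

theorem A_char (nums : List Int) : maxBalancedSubarray nums = gA nums nums.length := by
  obtain ⟨seen, hfold, _, _⟩ := A_loop nums nums.length (le_refl _)
  simp only [maxBalancedSubarray, PySem.List.len_eq]
  rw [hfold]

-- ===== B characterization =====
theorem B_inner (nums : List Int) (i : Nat) (t : Nat) :
    ∀ m b, i ≤ m → m ≤ nums.length → nums.length - m = t →
    ((PySem.List.pyRange (m : Int) (nums.length : Int) 1).foldl (stepB nums (i : Int))
        (gXor (gSeg nums i m), gBal (gSeg nums i m), b)).2.2
      = (List.range' (m + 1) t).foldl
          (fun a q => if gKey nums q = gKey nums i then max a ((q : Int) - (i : Int)) else a) b := by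
  induction t with
  | zero =>
    intro m b him hm ht
    have hmn : m = nums.length := by omega
    subst hmn
    rw [PySem.List.pyRange_one_eq_nil (le_refl _)]
    simp
  | succ t ih =>
    intro m b him hm ht
    have hlt : m < nums.length := by omega
    rw [PySem.List.pyRange_one_cons (by exact_mod_cast hlt), List.foldl_cons]
    have hx : PySem.List.pyGetD nums (m : Int) 0 = nums.getD m 0 := PySem.List.pyGetD_natCast nums m 0
    have hstep : stepB nums (i : Int) (gXor (gSeg nums i m), gBal (gSeg nums i m), b) (m : Int)
        = (gXor (gSeg nums i (m + 1)), gBal (gSeg nums i (m + 1)),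
           if gKey nums (m + 1) = gKey nums i then max b ((((m : Nat) + 1 : Nat) : Int) - (i : Int)) else b) := by
      rw [stepB]
      simp only [hx]
      rw [show (if PySem.Int.mod (nums.getD m 0) 2 = 0 then (1 : Int) else -1) = gSign (nums.getD m 0) by
        rw [gSign]]
      rw [gSeg_succ him hlt, gXor_append, gBal_append, gXor_singleton, gBal_singleton]
      have hcond : (PySem.Int.bxor (gXor (gSeg nums i m)) (nums.getD m 0) = 0 ∧
          gBal (gSeg nums i m) + gSign (nums.getD m 0) = 0)
          ↔ gKey nums (m + 1) = gKey nums i := by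
        rw [gKey_eq_iff (by omega : i ≤ m + 1), gSeg_succ him hlt, gXor_append, gBal_append,
          gXor_singleton, gBal_singleton]
      by_cases hk : gKey nums (m + 1) = gKey nums i
      · rw [if_pos (hcond.mpr hk), if_pos hk]
        have : (m : Int) - (i : Int) + 1 = (((m + 1 : Nat)) : Int) - (i : Int) := by push_cast; ring
        rw [this]
      · rw [if_neg (fun hc => hk (hcond.mp hc)), if_neg hk]
    rw [hstep]
    have hcast : ((m : Int) + 1) = (((m + 1 : Nat)) : Int) := by push_cast; ring
    rw [hcast, ih (m + 1) _ (by omega) (by omega) (by omega)]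
    rw [List.range'_succ, List.foldl_cons]

theorem B_char (nums : List Int) :
    maxBalancedSubarray_alt nums =
      (List.range nums.length).foldl
        (fun b i => (List.range' (i + 1) (nums.length - i)).foldl
          (fun a q => if gKey nums q = gKey nums i then max a ((q : Int) - (i : Int)) else a) b) 0 := by
  simp only [maxBalancedSubarray_alt, PySem.List.len_eq, PySem.List.pyRange_zero_natCast, List.foldl_map]
  apply PySem.List.foldl_congr_mem
  intro acc i hi
  have hin : i < nums.length := List.mem_range.mp hi
  have h0 : gXor (gSeg nums i i) = 0 := by rw [gSeg_self]; rfl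
  have h1 : gBal (gSeg nums i i) = 0 := by rw [gSeg_self]; rfl
  have := B_inner nums i (nums.length - i) i acc (le_refl i) (by omega) rfl
  rw [h0, h1] at this
  exact this

-- ===== combining =====
theorem foldl_max_le {α : Type} (l : List α) (f : α → Int) (a b : Int) (ha : a ≤ b)
    (h : ∀ x ∈ l, f x ≤ b) : l.foldl (fun acc x => max acc (f x)) a ≤ b := by
  induction l generalizing a with
  | nil => exact ha
  | cons x t ih =>
    exact ih _ (max_le ha (h x List.mem_cons_self)) (fun y hy => h y (List.mem_cons_of_mem _ hy))

def vB (pq : Nat × Nat) : Int := (pq.2 : Int) - (pq.1 : Int)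

def pairsL (nums : List Int) : List (Nat × Nat) :=
  (List.range nums.length).flatMap (fun i =>
    ((List.range' (i + 1) (nums.length - i)).filter
        (fun q => decide (gKey nums q = gKey nums i))).map (fun q => (i, q)))

theorem foldl_foldl_flatMap {α β γ : Type} (L : List α) (h : α → List β) (g : γ → β → γ)
    (init : γ) : L.foldl (fun b i => (h i).foldl g b) init = (L.flatMap h).foldl g init := by
  induction L generalizing init with
  | nil => rfl
  | cons x t ih => simp [List.flatMap_cons, List.foldl_append, ih]

theorem gB_flat (nums : List Int) :
    (List.range nums.length).foldl
        (fun b i => (List.range' (i + 1) (nums.length - i)).foldl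
          (fun a q => if gKey nums q = gKey nums i then max a ((q : Int) - (i : Int)) else a) b) 0
      = (pairsL nums).foldl (fun a pq => max a (vB pq)) 0 := by
  rw [pairsL, ← foldl_foldl_flatMap]
  apply PySem.List.foldl_congr_mem
  intro acc i _
  rw [List.foldl_map, PySem.List.foldl_ite_eq_foldl_filter]
  rfl

theorem mem_pairsL {nums : List Int} {pq : Nat × Nat} :
    pq ∈ pairsL nums ↔ pq.1 < pq.2 ∧ pq.2 ≤ nums.length ∧ gKey nums pq.2 = gKey nums pq.1 := by
  rcases pq with ⟨i, q⟩
  constructor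
  · intro h
    obtain ⟨a, ha, hmem⟩ := List.mem_flatMap.mp h
    obtain ⟨x, hx, heq⟩ := List.mem_map.mp hmem
    obtain ⟨hxr, hxf⟩ := List.mem_filter.mp hx
    obtain ⟨h1, h2⟩ := List.mem_range'_1.mp hxr
    injection heq with e1 e2
    rw [← e1, ← e2]
    have han : a < nums.length := List.mem_range.mp ha
    exact ⟨by omega, by omega, of_decide_eq_true hxf⟩
  · rintro ⟨h1, h2, h3⟩
    exact List.mem_flatMap.mpr ⟨i, List.mem_range.mpr (by omega),
      List.mem_map.mpr ⟨q, List.mem_filter.mpr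
        ⟨List.mem_range'_1.mpr ⟨by omega, by omega⟩, decide_eq_true h3⟩, rfl⟩⟩

theorem gB_nonneg (nums : List Int) : 0 ≤ (pairsL nums).foldl (fun a pq => max a (vB pq)) 0 :=
  (PySem.List.le_foldl_max_int (pairsL nums) vB 0).1

theorem gA_eq_gB (nums : List Int) :
    gA nums nums.length =
      (List.range nums.length).foldl
        (fun b i => (List.range' (i + 1) (nums.length - i)).foldl
          (fun a q => if gKey nums q = gKey nums i then max a ((q : Int) - (i : Int)) else a) b) 0 := by
  rw [gB_flat]
  apply le_antisymm
  · rw [gA]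
    apply foldl_max_le _ (vA nums) 0 _ (gB_nonneg nums)
    intro j hj
    have hjn : j < nums.length := List.mem_range.mp hj
    by_cases hF : gF nums (j + 1) = j + 1
    · rw [vA, hF]
      simpa using gB_nonneg nums
    · have hFlt : gF nums (j + 1) < j + 1 := lt_of_le_of_ne (gF_le nums (j + 1)) hF
      have hmem : (gF nums (j + 1), j + 1) ∈ pairsL nums :=
        mem_pairsL.mpr ⟨hFlt, by omega, (gF_key nums (j + 1)).symm⟩
      have hle := (PySem.List.le_foldl_max_int (pairsL nums) vB 0).2 _ hmem
      have hv : vA nums j = vB (gF nums (j + 1), j + 1) := by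
        rw [vA, vB]
        push_cast
        ring
      rw [hv]
      exact hle
  · apply foldl_max_le _ vB 0 _ (gA_nonneg nums nums.length)
    intro pq hmem
    obtain ⟨h1, h2, h3⟩ := mem_pairsL.mp hmem
    have hq1 : 1 ≤ pq.2 := by omega
    have hjmem : pq.2 - 1 ∈ List.range nums.length := List.mem_range.mpr (by omega)
    have hle := (PySem.List.le_foldl_max_int (List.range nums.length) (vA nums) 0).2 _ hjmem
    rw [gA]
    refine le_trans ?_ hle
    rw [vA]
    have hsucc : pq.2 - 1 + 1 = pq.2 := by omega
    rw [hsucc]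
    have hFle : gF nums pq.2 ≤ pq.1 := gF_min h3.symm
    rw [vB]
    have hc : ((pq.2 - 1 : Nat) : Int) = (pq.2 : Int) - 1 := by omega
    rw [hc]
    have : ((gF nums pq.2 : Nat) : Int) ≤ (pq.1 : Int) := by exact_mod_cast hFle
    omega

-- ===== VERDICT (by name: the statement is the Claim_ definition above) =====
theorem maxBalancedSubarray_spec : Claim_equal_maxBalancedSubarray := by
  intro nums _
  show maxBalancedSubarray nums = maxBalancedSubarray_alt nums
  rw [A_char, B_char, gA_eq_gB]
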